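-- pv_equiv track=rewrite | github.com/ElmarUhl/English | kvtml_reorder.py | changeValues
-- ===== SOURCE A (Python) =====
-- def changeValues(lower, upper, new_lower, text):
--     # Creates a list with all entry to be changes
--     old_limits = []
--     for n in range(lower, upper + 1):
--         old_limits.append(f'entry id=\"{n}\"')
--
--     # Creates a list with all entry changed
--     new_upper = (upper - lower + 1) + new_lower
--     new_limits = []
--     for n in range(new_lower, new_upper):
--         new_limits.append(f'entry id=\"{n}\"')
--
--     # Creates a list flag to identify if a line was changed
--     changed = []
--     for n in range(0,len(text)):
--         changed.append(0)
--
--     # Read list with input file lines and change the lines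
--     for nStd in range(0, len(old_limits)):
--         for nlT in range(0, len(text)):
--             if text[nlT].find(old_limits[nStd]) != -1 and changed[nlT] == 0:
--                 text[nlT] = text[nlT].replace(old_limits[nStd],new_limits[nStd])
--                 changed[nlT] = 1
--
--     return text
-- ===== SOURCE B (Python) =====
-- def changeValues(lower, upper, new_lower, text):
--     # Mutates `text` in place like the original; per-line first-match renumbering.
--     shift = new_lower - lower
--     for i, line in enumerate(text):
--         for n in range(lower, upper + 1):
--             old = f'entry id="{n}"'
--             if old in line:
--                 text[i] = line.replace(old, f'entry id="{n + shift}"')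
--                 break
--     return text
-- ===== Notes on version B (the rewrite author's own statement) =====
-- stated objective: simpler
-- what changed: Replaces A's id-major sweep (precomputed old/new tag lists plus a mutable 'changed' flag array, rescanning all lines for every id) by a line-major pass: each line independently searches for the first id in [lower,upper] it contains and replaces it, with an early break and no auxiliary lists.
import Mathlib
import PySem

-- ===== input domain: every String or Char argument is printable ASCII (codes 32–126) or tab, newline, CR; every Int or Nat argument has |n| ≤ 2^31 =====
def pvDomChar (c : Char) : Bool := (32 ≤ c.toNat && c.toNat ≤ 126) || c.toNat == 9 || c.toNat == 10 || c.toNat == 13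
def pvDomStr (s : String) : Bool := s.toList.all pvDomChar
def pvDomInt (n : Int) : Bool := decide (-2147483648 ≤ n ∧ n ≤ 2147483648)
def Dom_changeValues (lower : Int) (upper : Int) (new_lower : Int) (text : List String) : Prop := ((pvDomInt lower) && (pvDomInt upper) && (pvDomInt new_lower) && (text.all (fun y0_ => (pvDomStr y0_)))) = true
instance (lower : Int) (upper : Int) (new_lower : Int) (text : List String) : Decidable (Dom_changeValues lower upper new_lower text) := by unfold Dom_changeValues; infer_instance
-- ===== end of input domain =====

-- B replaces A's id-sweep over a mutable `changed` flag array by an independent per-line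
-- first-match renumbering (loop interchange, map over lines); same return value everywhere.
-- A mutates `text` in place in Python and so does B; the theorem is about the return value.


-- f'entry id="{n}"' (used by both Pythons verbatim)
def entryTag (n : Int) : String := "entry id=\"" ++ PySem.Int.toStr n ++ "\""

-- ===== PORT A =====
def changeValues (lower : Int) (upper : Int) (new_lower : Int) (text : List String) : List String :=
  let old_limits := (PySem.List.pyRange lower (upper + 1) 1).map (fun n => entryTag n)
  let new_upper := (upper - lower + 1) + new_lower
  let new_limits := (PySem.List.pyRange new_lower new_upper 1).map (fun n => entryTag n)
  let changed : List Int := (PySem.List.pyRange 0 (PySem.List.len text) 1).map (fun _ => 0)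
  let final :=
    (PySem.List.pyRange 0 (PySem.List.len old_limits) 1).foldl
      (fun (st : List String × List Int) nStd =>
        (PySem.List.pyRange 0 (PySem.List.len st.1) 1).foldl
          (fun (st : List String × List Int) nlT =>
            if PySem.Str.find (PySem.List.pyGetD st.1 nlT "") (PySem.List.pyGetD old_limits nStd "") ≠ -1
                ∧ PySem.List.pyGetD st.2 nlT 0 = 0 then
              (PySem.List.pySetD st.1 nlT
                 (PySem.Str.replace (PySem.List.pyGetD st.1 nlT "")
                    (PySem.List.pyGetD old_limits nStd "") (PySem.List.pyGetD new_limits nStd "")),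
               PySem.List.pySetD st.2 nlT 1)
            else st)
          st)
      (text, changed)
  final.1

-- ===== PORT B =====
-- scan the ids ascending, replace at the first one contained in the line
def fixLine (shift : Int) (line : String) : List Int → String
  | [] => line
  | n :: rest =>
    if PySem.Str.isIn (entryTag n) line then
      PySem.Str.replace line (entryTag n) (entryTag (n + shift))
    else fixLine shift line rest

def changeValues_alt (lower : Int) (upper : Int) (new_lower : Int) (text : List String) : List String :=
  let shift := new_lower - lower
  text.map (fun line => fixLine shift line (PySem.List.pyRange lower (upper + 1) 1))

-- ===== PRECONDITION & SPEC =====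
def Spec_changeValues (lower : Int) (upper : Int) (new_lower : Int) (text : List String) (out : List String) : Prop := out = changeValues_alt lower upper new_lower text
instance (lower : Int) (upper : Int) (new_lower : Int) (text : List String) (out : List String) : Decidable (Spec_changeValues lower upper new_lower text out) := by unfold Spec_changeValues; infer_instance

-- ===== CLAIM (what is proved, stated in full; the proofs are below) =====
def Claim_equal_changeValues : Prop := ∀ (lower : Int) (upper : Int) (new_lower : Int) (text : List String), Dom_changeValues lower upper new_lower text → Spec_changeValues lower upper new_lower text (changeValues lower upper new_lower text)

-- ===== LEMMAS AND PROOFS =====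

-- one step of A on one (line, flag) pair
def stepA (o w : String) (x : String × Int) : String × Int :=
  if PySem.Str.find x.1 o ≠ -1 ∧ x.2 = 0 then (PySem.Str.replace x.1 o w, 1) else x

-- A's update of the whole state at line index nlT
def updA (old_limits new_limits : List String) (nStd : Int) (st : List String × List Int) (nlT : Int) :
    List String × List Int :=
  if PySem.Str.find (PySem.List.pyGetD st.1 nlT "") (PySem.List.pyGetD old_limits nStd "") ≠ -1
      ∧ PySem.List.pyGetD st.2 nlT 0 = 0 then
    (PySem.List.pySetD st.1 nlT
       (PySem.Str.replace (PySem.List.pyGetD st.1 nlT "")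
          (PySem.List.pyGetD old_limits nStd "") (PySem.List.pyGetD new_limits nStd "")),
     PySem.List.pySetD st.2 nlT 1)
  else st

-- de-index a fold reading two equal-length lists at index i
theorem foldl_idx_pair {γ : Type} (g : γ → String → String → γ) :
    ∀ (xs ys po pw : List String) (acc : γ), ys.length = xs.length → pw.length = po.length →
    (PySem.List.pyRange (po.length : Int) ((po.length : Int) + (xs.length : Int)) 1).foldl
      (fun acc i => g acc (PySem.List.pyGetD (po ++ xs) i "") (PySem.List.pyGetD (pw ++ ys) i "")) acc
    = (xs.zip ys).foldl (fun acc p => g acc p.1 p.2) acc := by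
  intro xs
  induction xs with
  | nil =>
    intro ys po pw acc hy hp
    rw [List.length_nil]
    simp [PySem.List.pyRange_one_eq_nil]
  | cons x xs ih =>
    intro ys po pw acc hy hp
    cases ys with
    | nil => simp at hy
    | cons y ys =>
      rw [PySem.List.pyRange_one_cons (by simp), List.foldl_cons]
      have e1 : PySem.List.pyGetD (po ++ x :: xs) ((po.length : Int)) "" = x := by
        rw [PySem.List.pyGetD_natCast]; simp
      have e2 : PySem.List.pyGetD (pw ++ y :: ys) ((po.length : Int)) "" = y := by
        rw [← hp, PySem.List.pyGetD_natCast]; simp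
      rw [e1, e2]
      have hr : ((po.length : Int) + 1) = (((po ++ [x]).length : Int)) := by simp
      have hr2 : ((po.length : Int) + ((x :: xs).length : Int))
          = (((po ++ [x]).length : Int) + (xs.length : Int)) := by simp; omega
      rw [hr, hr2]
      have hIH := ih ys (po ++ [x]) (pw ++ [y]) (g acc x y)
        (by simpa using hy) (by simp [hp])
      simpa using hIH

-- A's inner pass over the lines = pointwise stepA
theorem innerPass_eq (o w : String) :
    ∀ (ts : List String) (cs : List Int) (pt : List String) (pc : List Int),
    cs.length = ts.length → pc.length = pt.length →
    (PySem.List.pyRange (pt.length : Int) (((pt ++ ts).length : Int)) 1).foldl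
      (fun st nlT =>
        if PySem.Str.find (PySem.List.pyGetD st.1 nlT "") o ≠ -1
            ∧ PySem.List.pyGetD st.2 nlT 0 = 0 then
          (PySem.List.pySetD st.1 nlT
             (PySem.Str.replace (PySem.List.pyGetD st.1 nlT "") o w),
           PySem.List.pySetD st.2 nlT 1)
        else st)
      (pt ++ ts, pc ++ cs)
    = (pt ++ ((ts.zip cs).map (fun x => (stepA o w x).1)),
       pc ++ ((ts.zip cs).map (fun x => (stepA o w x).2))) := by
  intro ts
  induction ts with
  | nil =>
    intro cs pt pc hc hp
    rw [List.length_eq_zero_iff.mp hc]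
    simp [PySem.List.pyRange_one_eq_nil]
  | cons t ts ih =>
    intro cs pt pc hc hp
    cases cs with
    | nil => simp at hc
    | cons c cs =>
      rw [PySem.List.pyRange_one_cons (by simp), List.foldl_cons]
      have e1 : PySem.List.pyGetD (pt ++ t :: ts) ((pt.length : Int)) "" = t := by
        rw [PySem.List.pyGetD_natCast]; simp
      have e2 : PySem.List.pyGetD (pc ++ c :: cs) ((pt.length : Int)) 0 = c := by
        rw [← hp, PySem.List.pyGetD_natCast]; simp
      have e3 : PySem.List.pySetD (pt ++ t :: ts) ((pt.length : Int))
            (PySem.Str.replace t o w) = pt ++ PySem.Str.replace t o w :: ts := by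
        rw [PySem.List.pySetD_natCast]; simp
      have e4 : PySem.List.pySetD (pc ++ c :: cs) ((pt.length : Int)) 1 = pc ++ (1 : Int) :: cs := by
        rw [← hp, PySem.List.pySetD_natCast]; simp
      have hstep :
          (if PySem.Str.find (PySem.List.pyGetD (pt ++ t :: ts, pc ++ c :: cs).1 ((pt.length : Int)) "") o ≠ -1
              ∧ PySem.List.pyGetD (pt ++ t :: ts, pc ++ c :: cs).2 ((pt.length : Int)) 0 = 0 then
            (PySem.List.pySetD (pt ++ t :: ts, pc ++ c :: cs).1 ((pt.length : Int))
               (PySem.Str.replace (PySem.List.pyGetD (pt ++ t :: ts, pc ++ c :: cs).1 ((pt.length : Int)) "") o w),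
             PySem.List.pySetD (pt ++ t :: ts, pc ++ c :: cs).2 ((pt.length : Int)) 1)
          else (pt ++ t :: ts, pc ++ c :: cs))
          = (pt ++ (stepA o w (t, c)).1 :: ts, pc ++ (stepA o w (t, c)).2 :: cs) := by
        by_cases hcond : PySem.Str.find t o ≠ -1 ∧ c = 0
        · rw [if_pos (by simpa [e1, e2] using hcond)]
          simp only [e1, e3, e4, stepA]
          rw [if_pos hcond]
        · rw [if_neg (by simpa [e1, e2] using hcond)]
          simp only [stepA]
          rw [if_neg hcond]
      rw [hstep]
      have hr : ((pt.length : Int) + 1) = (((pt ++ [(stepA o w (t, c)).1]).length : Int)) := by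
        simp
      have hr2 : (((pt ++ t :: ts).length : Int))
          = (((pt ++ [(stepA o w (t, c)).1] ++ ts).length : Int)) := by simp
      rw [hr, hr2]
      have hIH := ih cs (pt ++ [(stepA o w (t, c)).1]) (pc ++ [(stepA o w (t, c)).2])
        (by simpa using hc) (by simp [hp])
      simpa using hIH

-- fold of maps = map of folds
theorem foldl_map_eq_map_foldl {α β : Type} (f : β → α → α) :
    ∀ (ps : List β) (S : List α),
    ps.foldl (fun S p => S.map (f p)) S = S.map (fun x => ps.foldl (fun x p => f p x) x) := by
  intro ps
  induction ps with
  | nil => intro S; simp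
  | cons p ps ih => intro S; simp [ih, List.map_map]

-- once the flag is 1, stepA never changes the pair again
theorem foldl_stepA_one (ps : List (String × String)) (s : String) :
    ps.foldl (fun x p => stepA p.1 p.2 x) (s, 1) = (s, 1) := by
  induction ps with
  | nil => rfl
  | cons p ps ih =>
    rw [List.foldl_cons]
    have h1 : stepA p.1 p.2 (s, 1) = (s, 1) := by simp [stepA]
    rw [h1]; exact ih

-- per-line: A's fold over the (old, new) pairs computes B's first-match replacement
theorem perLine_eq (shift : Int) :
    ∀ (ns : List Int) (s : String),
    ((ns.map (fun n => (entryTag n, entryTag (n + shift)))).foldl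
       (fun x p => stepA p.1 p.2 x) (s, 0)).1 = fixLine shift s ns := by
  intro ns
  induction ns with
  | nil => intro s; rfl
  | cons n ns ih =>
    intro s
    rw [List.map_cons, List.foldl_cons, fixLine]
    by_cases h : PySem.Str.isIn (entryTag n) s
    · have hf : PySem.Str.find s (entryTag n) ≠ -1 := by
        rw [PySem.Str.find_ne_neg_one_iff]
        exact (PySem.Str.isIn_iff_infix _ _).mp h
      have h2 : stepA (entryTag n) (entryTag (n + shift)) (s, 0)
          = (PySem.Str.replace s (entryTag n) (entryTag (n + shift)), 1) := by
        simp only [stepA]; rw [if_pos ⟨hf, by trivial⟩]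
      rw [h2, if_pos h, foldl_stepA_one]
    · have hf : ¬ PySem.Str.find s (entryTag n) ≠ -1 := by
        simp only [ne_eq, not_not, PySem.Str.find_eq_neg_one_iff]
        intro hc
        exact h ((PySem.Str.isIn_iff_infix _ _).mpr hc)
      have h2 : stepA (entryTag n) (entryTag (n + shift)) (s, 0) = (s, 0) := by
        simp only [stepA]; rw [if_neg (fun hx => hf hx.1)]
      rw [h2, if_neg h]
      exact ih s

-- shifting the id range shifts the tags
theorem new_limits_eq (lower upper new_lower : Int) :
    (PySem.List.pyRange new_lower ((upper - lower + 1) + new_lower) 1).map (fun n => entryTag n)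
    = (PySem.List.pyRange lower (upper + 1) 1).map (fun n => entryTag (n + (new_lower - lower))) := by
  rw [PySem.List.pyRange_one, PySem.List.pyRange_one, List.map_map, List.map_map]
  have : ((upper - lower + 1) + new_lower - new_lower).toNat = (upper + 1 - lower).toNat := by omega
  rw [this]
  apply List.map_congr_left
  intro k _
  simp only [Function.comp_apply]
  congr 1
  omega

-- inner pass, packaged (definitionally A's inner loop body)
def innerA (o w : String) (st : List String × List Int) : List String × List Int :=
  (PySem.List.pyRange 0 (PySem.List.len st.1) 1).foldl
    (fun (st : List String × List Int) nlT =>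
      if PySem.Str.find (PySem.List.pyGetD st.1 nlT "") o ≠ -1
          ∧ PySem.List.pyGetD st.2 nlT 0 = 0 then
        (PySem.List.pySetD st.1 nlT
           (PySem.Str.replace (PySem.List.pyGetD st.1 nlT "") o w),
         PySem.List.pySetD st.2 nlT 1)
      else st)
    st

theorem innerA_eq (o w : String) (ts : List String) (cs : List Int) (h : cs.length = ts.length) :
    innerA o w (ts, cs)
    = ((ts.zip cs).map (fun x => (stepA o w x).1), (ts.zip cs).map (fun x => (stepA o w x).2)) := by
  have := innerPass_eq o w ts cs [] [] h rfl
  simpa [innerA, PySem.List.len_eq] using this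

theorem foldl_idx_pair0 {γ : Type} (g : γ → String → String → γ) (xs ys : List String) (acc : γ)
    (h : ys.length = xs.length) :
    (PySem.List.pyRange 0 (xs.length : Int) 1).foldl
      (fun acc i => g acc (PySem.List.pyGetD xs i "") (PySem.List.pyGetD ys i "")) acc
    = (xs.zip ys).foldl (fun acc p => g acc p.1 p.2) acc := by
  have := foldl_idx_pair g xs ys [] [] acc h rfl
  simpa using this

theorem outerFold_eq :
    ∀ (ps : List (String × String)) (S : List (String × Int)),
    ps.foldl (fun st p => innerA p.1 p.2 st) (S.map Prod.fst, S.map Prod.snd)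
    = ((ps.foldl (fun S p => S.map (stepA p.1 p.2)) S).map Prod.fst,
       (ps.foldl (fun S p => S.map (stepA p.1 p.2)) S).map Prod.snd) := by
  intro ps
  induction ps with
  | nil => intro S; rfl
  | cons p ps ih =>
    intro S
    rw [List.foldl_cons, List.foldl_cons,
        innerA_eq p.1 p.2 (S.map Prod.fst) (S.map Prod.snd) (by simp)]
    have hz : (S.map Prod.fst).zip (S.map Prod.snd) = S := (List.zip_of_prod rfl rfl).symm
    rw [hz]
    have h1 : (S.map (fun x => (stepA p.1 p.2 x).1))
        = (S.map (stepA p.1 p.2)).map Prod.fst := by simp [List.map_map]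
    have h2 : (S.map (fun x => (stepA p.1 p.2 x).2))
        = (S.map (stepA p.1 p.2)).map Prod.snd := by simp [List.map_map]
    rw [h1, h2, ih]

theorem outer_deindex (os ws : List String) (acc : List String × List Int)
    (h : ws.length = os.length) :
    (PySem.List.pyRange 0 (os.length : Int) 1).foldl
      (fun acc i => innerA (PySem.List.pyGetD os i "") (PySem.List.pyGetD ws i "") acc) acc
    = (os.zip ws).foldl (fun acc p => innerA p.1 p.2 acc) acc :=
  foldl_idx_pair0 (fun st o w => innerA o w st) os ws acc h

theorem changeValues_eq_alt (l u nl : Int) (text : List String) :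
    changeValues l u nl text = changeValues_alt l u nl text := by
  unfold changeValues changeValues_alt
  dsimp only
  rw [new_limits_eq l u nl]
  simp only [PySem.List.len_eq]
  have hinit : (text, (PySem.List.pyRange 0 (text.length : Int) 1).map (fun _ => (0 : Int)))
      = ((text.map (fun s => (s, (0 : Int)))).map Prod.fst,
         (text.map (fun s => (s, (0 : Int)))).map Prod.snd) := by
    rw [PySem.List.pyRange_one]
    simp [List.map_map, Function.comp_def]
  rw [hinit]
  generalize PySem.List.pyRange l (u + 1) 1 = ns
  have hb : (fun (st : List String × List Int) (nStd : Int) =>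
        (PySem.List.pyRange 0 ((st.1.length : Int)) 1).foldl
          (fun (st : List String × List Int) nlT =>
            if PySem.Str.find (PySem.List.pyGetD st.1 nlT "")
                  (PySem.List.pyGetD (ns.map (fun n => entryTag n)) nStd "") ≠ -1
                ∧ PySem.List.pyGetD st.2 nlT 0 = 0 then
              (PySem.List.pySetD st.1 nlT
                 (PySem.Str.replace (PySem.List.pyGetD st.1 nlT "")
                    (PySem.List.pyGetD (ns.map (fun n => entryTag n)) nStd "")
                    (PySem.List.pyGetD (ns.map (fun n => entryTag (n + (nl - l)))) nStd "")),
               PySem.List.pySetD st.2 nlT 1)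
            else st)
          st)
      = (fun st nStd => innerA (PySem.List.pyGetD (ns.map (fun n => entryTag n)) nStd "")
          (PySem.List.pyGetD (ns.map (fun n => entryTag (n + (nl - l)))) nStd "") st) := by
    funext st nStd
    simp only [innerA, PySem.List.len_eq]
  rw [hb]
  rw [outer_deindex (ns.map (fun n => entryTag n)) (ns.map (fun n => entryTag (n + (nl - l))))
        _ (by simp)]
  rw [List.zip_map']
  rw [outerFold_eq]
  dsimp only
  rw [foldl_map_eq_map_foldl (fun p x => stepA p.1 p.2 x)
        (ns.map (fun n => (entryTag n, entryTag (n + (nl - l)))))]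
  simp only [List.map_map]
  apply List.map_congr_left
  intro s _
  simpa using perLine_eq (nl - l) ns s

-- ===== VERDICT (by name: the statement is the Claim_ definition above) =====
theorem changeValues_spec : Claim_equal_changeValues := by
  intro l u nl text _
  unfold Spec_changeValues
  exact changeValues_eq_alt l u nl text
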